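-- pv_equiv track=rewrite | github.com/s3000-f/Graph | Subgraphs/Graphlets/g29.py | internal
-- ===== SOURCE A (Python) =====
-- def internal(graph):
--     siz = len(graph)
--     deletions = set()
--     cnt = 0
--     for i in range(0, siz):
--         for j in range(0, siz):
--             for k in range(0, siz):
--                 for l in range(0, siz):
--                     for m in range(0, siz):
--                         if (i != j and i != k and i != l and i != m and j != k
--                                 and j != l and j != m and k != l and k != m and l != m):
--                             if (graph[i][j] == 1 and graph[i][k] == 1 and graph[i][l] == 1 and
--                                     graph[i][m] == 1 and graph[j][k] == 1 and graph[j][l] == 1 and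
--                                     graph[j][m] == 1 and graph[k][l] == 1 and graph[k][m] == 1
--                                     and graph[l][m] == 1):
--                                 cnt += 1
--                                 deletions.add((i, j))
--                                 deletions.add((j, i))
--                                 deletions.add((i, k))
--                                 deletions.add((k, i))
--                                 deletions.add((i, l))
--                                 deletions.add((l, i))
--                                 deletions.add((i, m))
--                                 deletions.add((m, i))
--                                 deletions.add((j, k))
--                                 deletions.add((k, j))
--                                 deletions.add((j, l))
--                                 deletions.add((l, j))
--                                 deletions.add((j, m))
--                                 deletions.add((m, j))
--                                 deletions.add((l, k))
--                                 deletions.add((k, l))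
--                                 deletions.add((m, k))
--                                 deletions.add((k, m))
--                                 deletions.add((m, l))
--                                 deletions.add((l, m))
--     return cnt, deletions
-- ===== SOURCE B (Python) =====
-- def internal(graph):
--     # Depth-limited backtracking: grow an ordered chain of distinct vertices,
--     # extending only when every earlier chain vertex has a directed edge to the
--     # candidate; a completed chain of 5 is one counted ordered K5.
--     siz = len(graph)
--     deletions = set()
--     cnt = 0
--     if siz < 5:
--         return cnt, deletions  # no room for a 5-clique
--
--     def search(chain):
--         nonlocal cnt
--         if len(chain) == 5:
--             cnt += 1
--             a, b, c, d, e = chain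
--             # the ten unordered pairs of the clique, each marked in both directions
--             for x, y in ((a, b), (a, c), (a, d), (a, e), (b, c),
--                          (b, d), (b, e), (d, c), (e, c), (e, d)):
--                 deletions.add((x, y))
--                 deletions.add((y, x))
--             return
--         for v in range(siz):
--             if v in chain:
--                 continue
--             if all(graph[u][v] == 1 for u in chain):
--                 search(chain + [v])
--
--     search([])
--     return cnt, deletions
-- ===== Notes on version B (the rewrite author's own statement) =====
-- stated objective: faster
-- what changed: Replaced the five flat nested loops (which test every ordered 5-tuple against a 20-conjunct guard) by a depth-limited backtracking search that grows an ordered chain of distinct vertices and prunes a partial chain as soon as a required directed edge is missing.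
import Mathlib
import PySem

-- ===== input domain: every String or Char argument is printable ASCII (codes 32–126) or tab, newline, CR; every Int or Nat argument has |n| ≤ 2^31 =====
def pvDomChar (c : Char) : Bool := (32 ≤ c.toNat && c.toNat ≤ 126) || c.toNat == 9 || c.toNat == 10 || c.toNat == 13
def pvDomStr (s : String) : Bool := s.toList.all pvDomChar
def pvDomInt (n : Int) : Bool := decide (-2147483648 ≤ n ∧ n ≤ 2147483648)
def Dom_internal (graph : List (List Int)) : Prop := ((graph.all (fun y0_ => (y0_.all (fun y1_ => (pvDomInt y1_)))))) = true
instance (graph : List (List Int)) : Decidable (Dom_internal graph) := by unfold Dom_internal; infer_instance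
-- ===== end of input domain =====

-- B replaces A's five flat nested loops by a pruned depth-limited backtracking search over growing ordered chains; both mark the same edge set.


-- ===== PORT A =====
-- graph[u][v] as Python computes it: none = IndexError (excluded by Pre_)
def aGet (graph : List (List Int)) (u v : Int) : Option Int :=
  match PySem.List.pyGet? graph u with
  | some row => PySem.List.pyGet? row v
  | none => none

def internal (graph : List (List Int)) : Int × (List (Int × Int)) :=
  let siz : Int := (graph.length : Int)
  let r := PySem.List.pyRange 0 siz 1
  r.foldl (fun s1 i =>
    r.foldl (fun s2 j =>
      r.foldl (fun s3 k =>
        r.foldl (fun s4 l =>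
          r.foldl (fun s5 m =>
            if i != j && i != k && i != l && i != m && j != k && j != l && j != m && k != l && k != m && l != m then
              if aGet graph i j == some 1 && aGet graph i k == some 1 && aGet graph i l == some 1 &&
                 aGet graph i m == some 1 && aGet graph j k == some 1 && aGet graph j l == some 1 &&
                 aGet graph j m == some 1 && aGet graph k l == some 1 && aGet graph k m == some 1 &&
                 aGet graph l m == some 1 then
                let d0 := PySem.Set.add s5.2 (i, j)
                let d1 := PySem.Set.add d0 (j, i)
                let d2 := PySem.Set.add d1 (i, k)
                let d3 := PySem.Set.add d2 (k, i)
                let d4 := PySem.Set.add d3 (i, l)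
                let d5 := PySem.Set.add d4 (l, i)
                let d6 := PySem.Set.add d5 (i, m)
                let d7 := PySem.Set.add d6 (m, i)
                let d8 := PySem.Set.add d7 (j, k)
                let d9 := PySem.Set.add d8 (k, j)
                let d10 := PySem.Set.add d9 (j, l)
                let d11 := PySem.Set.add d10 (l, j)
                let d12 := PySem.Set.add d11 (j, m)
                let d13 := PySem.Set.add d12 (m, j)
                let d14 := PySem.Set.add d13 (l, k)
                let d15 := PySem.Set.add d14 (k, l)
                let d16 := PySem.Set.add d15 (m, k)
                let d17 := PySem.Set.add d16 (k, m)
                let d18 := PySem.Set.add d17 (m, l)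
                let d19 := PySem.Set.add d18 (l, m)
                (s5.1 + 1, d19)
              else s5
            else s5) s4) s3) s2) s1)
    ((0 : Int), (PySem.Set.empty : PySem.Set (Int × Int)))

-- ===== PORT B =====
def bGet (graph : List (List Int)) (u v : Int) : Option Int :=
  match PySem.List.pyGet? graph u with
  | some row => PySem.List.pyGet? row v
  | none => none

-- marking step of B when the chain is complete (B only calls it with 5 elements)
def bMark (d : PySem.Set (Int × Int)) (chain : List Int) : PySem.Set (Int × Int) :=
  match chain with
  | [a, b, c, d', e] =>
      [(a, b), (a, c), (a, d'), (a, e), (b, c), (b, d'), (b, e), (d', c), (e, c), (e, d')].foldl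
        (fun acc p => PySem.Set.add (PySem.Set.add acc p) (p.2, p.1)) d
  | _ => d

def bSearch (graph : List (List Int)) (r : List Int) :
    Nat → List Int → Int × PySem.Set (Int × Int) → Int × PySem.Set (Int × Int)
  | 0, chain, s => (s.1 + 1, bMark s.2 chain)
  | Nat.succ n, chain, s =>
      r.foldl (fun s v =>
        if chain.contains v then s
        else if chain.all (fun u => bGet graph u v == some 1) then
          bSearch graph r n (chain ++ [v]) s
        else s) s

def internal_alt (graph : List (List Int)) : Int × (List (Int × Int)) :=
  let siz : Int := (graph.length : Int)
  if siz < 5 then ((0 : Int), (PySem.Set.empty : PySem.Set (Int × Int)))  -- no room for a 5-clique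
  else
    let r := PySem.List.pyRange 0 siz 1
    bSearch graph r 5 [] ((0 : Int), (PySem.Set.empty : PySem.Set (Int × Int)))

-- ===== PRECONDITION & SPEC =====
-- Pre_ excludes ragged matrices with 5 or more rows (some row shorter than the number of
-- rows): there whether A raises IndexError depends only on `and` short-circuit evaluation
-- order, and on the few such inputs where A still returns it returns (0, set()), an accident
-- of which edge happens to be read first. With fewer than 5 rows no five distinct indices
-- exist, A inspects nothing and returns, so those graphs stay inside Pre_.
def Pre_internal (graph : List (List Int)) : Prop :=
  5 ≤ graph.length → ∀ row ∈ graph, graph.length ≤ row.length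
instance (graph : List (List Int)) : Decidable (Pre_internal graph) := by unfold Pre_internal; infer_instance
def pvWitness_internal : List (List Int) := [[0, 1], [1, 0]]

def Spec_internal (graph : List (List Int)) (out : Int × (List (Int × Int))) : Prop := out = internal_alt graph
instance (graph : List (List Int)) (out : Int × (List (Int × Int))) : Decidable (Spec_internal graph out) := by unfold Spec_internal; infer_instance

-- ===== CLAIM (what is proved, stated in full; the proofs are below) =====
def Claim_equal_internal : Prop := ∀ (graph : List (List Int)), Dom_internal graph → Pre_internal graph → Spec_internal graph (internal graph)

-- ===== LEMMAS AND PROOFS =====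

theorem foldl_id {α σ : Type} (l : List α) (f : σ → α → σ) (h : ∀ s x, f s x = s) :
    ∀ s : σ, l.foldl f s = s := by
  induction l with
  | nil => intro s; rfl
  | cons x xs ih => intro s; simp [List.foldl, h, ih]

theorem foldl_id_mem {α σ : Type} (l : List α) (f : σ → α → σ) (h : ∀ s x, x ∈ l → f s x = s) :
    ∀ s : σ, l.foldl f s = s := by
  induction l with
  | nil => intro s; rfl
  | cons x xs ih =>
    intro s
    rw [List.foldl_cons, h s x (List.mem_cons_self), ih (fun s y hy => h s y (List.mem_cons_of_mem x hy))]

theorem bGet_eq_aGet : bGet = aGet := rfl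

-- A's nested loops, innermost outwards, as named functions (definitionally the
-- loop bodies of `internal`)
def Am (g : List (List Int)) (r : List Int) (i j k l : Int)
    (s : Int × PySem.Set (Int × Int)) : Int × PySem.Set (Int × Int) :=
  r.foldl (fun s5 m =>
    if i != j && i != k && i != l && i != m && j != k && j != l && j != m && k != l && k != m && l != m then
      if aGet g i j == some 1 && aGet g i k == some 1 && aGet g i l == some 1 &&
         aGet g i m == some 1 && aGet g j k == some 1 && aGet g j l == some 1 &&
         aGet g j m == some 1 && aGet g k l == some 1 && aGet g k m == some 1 &&
         aGet g l m == some 1 then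
        let d0 := PySem.Set.add s5.2 (i, j)
        let d1 := PySem.Set.add d0 (j, i)
        let d2 := PySem.Set.add d1 (i, k)
        let d3 := PySem.Set.add d2 (k, i)
        let d4 := PySem.Set.add d3 (i, l)
        let d5 := PySem.Set.add d4 (l, i)
        let d6 := PySem.Set.add d5 (i, m)
        let d7 := PySem.Set.add d6 (m, i)
        let d8 := PySem.Set.add d7 (j, k)
        let d9 := PySem.Set.add d8 (k, j)
        let d10 := PySem.Set.add d9 (j, l)
        let d11 := PySem.Set.add d10 (l, j)
        let d12 := PySem.Set.add d11 (j, m)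
        let d13 := PySem.Set.add d12 (m, j)
        let d14 := PySem.Set.add d13 (l, k)
        let d15 := PySem.Set.add d14 (k, l)
        let d16 := PySem.Set.add d15 (m, k)
        let d17 := PySem.Set.add d16 (k, m)
        let d18 := PySem.Set.add d17 (m, l)
        let d19 := PySem.Set.add d18 (l, m)
        (s5.1 + 1, d19)
      else s5
    else s5) s

def Al (g : List (List Int)) (r : List Int) (i j k : Int)
    (s : Int × PySem.Set (Int × Int)) : Int × PySem.Set (Int × Int) :=
  r.foldl (fun s4 l => Am g r i j k l s4) s

def Ak (g : List (List Int)) (r : List Int) (i j : Int)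
    (s : Int × PySem.Set (Int × Int)) : Int × PySem.Set (Int × Int) :=
  r.foldl (fun s3 k => Al g r i j k s3) s

def Aj (g : List (List Int)) (r : List Int) (i : Int)
    (s : Int × PySem.Set (Int × Int)) : Int × PySem.Set (Int × Int) :=
  r.foldl (fun s2 j => Ak g r i j s2) s

def Ai (g : List (List Int)) (r : List Int)
    (s : Int × PySem.Set (Int × Int)) : Int × PySem.Set (Int × Int) :=
  r.foldl (fun s1 i => Aj g r i s1) s

set_option maxHeartbeats 4000000 in
theorem internal_eq_Ai (g : List (List Int)) :
    internal g = Ai g (PySem.List.pyRange 0 (g.length : Int) 1)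
      ((0 : Int), (PySem.Set.empty : PySem.Set (Int × Int))) := by
  unfold internal Ai Aj Ak Al Am
  rfl

theorem bMark_quint (d : PySem.Set (Int × Int)) (i j k l m : Int) :
    bMark d [i, j, k, l, m] = PySem.Set.add (PySem.Set.add (PySem.Set.add (PySem.Set.add (PySem.Set.add (PySem.Set.add (PySem.Set.add (PySem.Set.add (PySem.Set.add (PySem.Set.add (PySem.Set.add (PySem.Set.add (PySem.Set.add (PySem.Set.add (PySem.Set.add (PySem.Set.add (PySem.Set.add (PySem.Set.add (PySem.Set.add (PySem.Set.add (d) (i, j)) (j, i)) (i, k)) (k, i)) (i, l)) (l, i)) (i, m)) (m, i)) (j, k)) (k, j)) (j, l)) (l, j)) (j, m)) (m, j)) (l, k)) (k, l)) (m, k)) (k, m)) (m, l)) (l, m) := by simp [bMark]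

set_option maxHeartbeats 4000000 in
theorem Lm (g : List (List Int)) (r : List Int) (i j k l : Int)
    (hij : ¬ i = j) (hik : ¬ i = k) (hil : ¬ i = l) (hjk : ¬ j = k) (hjl : ¬ j = l) (hkl : ¬ k = l)
    (eij : aGet g i j = some 1) (eik : aGet g i k = some 1) (eil : aGet g i l = some 1)
    (ejk : aGet g j k = some 1) (ejl : aGet g j l = some 1) (ekl : aGet g k l = some 1)
    (s : Int × PySem.Set (Int × Int)) :
    Am g r i j k l s = bSearch g r 1 [i, j, k, l] s := by
  unfold Am bSearch
  congr 1
  funext s5 m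
  by_cases him : i = m <;> by_cases hjm : j = m <;> by_cases hkm : k = m <;> by_cases hlm : l = m <;>
    by_cases eim : aGet g i m = some 1 <;> by_cases ejm : aGet g j m = some 1 <;>
    by_cases ekm : aGet g k m = some 1 <;> by_cases elm : aGet g l m = some 1 <;>
    simp [bGet_eq_aGet, bSearch, bMark_quint, hij, hik, hil, hjk, hjl, hkl, him, hjm, hkm, hlm,
          eij, eik, eil, ejk, ejl, ekl, eim, ejm, ekm, elm] <;>
    (rintro (h | h | h | h) <;>
      first
        | exact absurd h.symm him
        | exact absurd h.symm hjm
        | exact absurd h.symm hkm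
        | exact absurd h.symm hlm)

set_option maxHeartbeats 4000000 in
theorem Ll (g : List (List Int)) (r : List Int) (i j k : Int)
    (hij : ¬ i = j) (hik : ¬ i = k) (hjk : ¬ j = k)
    (eij : aGet g i j = some 1) (eik : aGet g i k = some 1) (ejk : aGet g j k = some 1)
    (s : Int × PySem.Set (Int × Int)) :
    Al g r i j k s = bSearch g r 2 [i, j, k] s := by
  unfold Al bSearch
  congr 1
  funext s4 l
  by_cases hil : i = l <;> by_cases hjl : j = l <;> by_cases hkl : k = l <;>
    by_cases eil : aGet g i l = some 1 <;> by_cases ejl : aGet g j l = some 1 <;>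
    by_cases ekl : aGet g k l = some 1 <;>
    simp [bGet_eq_aGet, hil, hjl, hkl, eil, ejl, ekl] <;>
    first
      | exact Lm g r i j k l hij hik hil hjk hjl hkl eij eik eil ejk ejl ekl s4
      | (unfold Am; exact foldl_id _ _ (by intro s5 m; simp [hil, hjl, hkl, eil, ejl, ekl]) s4)
      | (rw [if_neg (by rintro (h | h | h); exacts [hil h.symm, hjl h.symm, hkl h.symm])];
         exact Lm g r i j k l hij hik hil hjk hjl hkl eij eik eil ejk ejl ekl s4)

set_option maxHeartbeats 4000000 in
theorem Lk (g : List (List Int)) (r : List Int) (i j : Int)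
    (hij : ¬ i = j) (eij : aGet g i j = some 1)
    (s : Int × PySem.Set (Int × Int)) :
    Ak g r i j s = bSearch g r 3 [i, j] s := by
  unfold Ak bSearch
  congr 1
  funext s3 k
  by_cases hik : i = k <;> by_cases hjk : j = k <;>
    by_cases eik : aGet g i k = some 1 <;> by_cases ejk : aGet g j k = some 1 <;>
    simp [bGet_eq_aGet, hik, hjk, eik, ejk] <;>
    first
      | exact Ll g r i j k hij hik hjk eij eik ejk s3
      | (unfold Al; exact foldl_id _ _ (by intro s4 l; unfold Am; exact foldl_id _ _ (by intro s5 m; simp [hik, hjk, eik, ejk]) s4) s3)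
      | (rw [if_neg (by rintro (h | h); exacts [hik h.symm, hjk h.symm])];
         exact Ll g r i j k hij hik hjk eij eik ejk s3)

set_option maxHeartbeats 4000000 in
theorem Lj (g : List (List Int)) (r : List Int) (i : Int)
    (s : Int × PySem.Set (Int × Int)) :
    Aj g r i s = bSearch g r 4 [i] s := by
  unfold Aj bSearch
  congr 1
  funext s2 j
  by_cases hij : i = j <;> by_cases eij : aGet g i j = some 1 <;>
    simp [bGet_eq_aGet, hij, eij] <;>
    first
      | exact Lk g r i j hij eij s2
      | (unfold Ak; exact foldl_id _ _ (by intro s3 k; unfold Al; exact foldl_id _ _ (by intro s4 l; unfold Am; exact foldl_id _ _ (by intro s5 m; simp [hij, eij]) s4) s3) s2)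
      | (rw [if_neg (fun h => hij h.symm)];
         exact Lk g r i j hij eij s2)

theorem Li (g : List (List Int)) (r : List Int)
    (s : Int × PySem.Set (Int × Int)) :
    Ai g r s = bSearch g r 5 [] s := by
  unfold Ai bSearch
  congr 1
  funext s1 i
  simpa using Lj g r i s1

theorem Ai_small (g : List (List Int)) (n : Int) (hn : n ≤ 4)
    (s : Int × PySem.Set (Int × Int)) :
    Ai g (PySem.List.pyRange 0 n 1) s = s := by
  unfold Ai
  refine foldl_id_mem _ _ (fun s1 i hi => ?_) s
  rw [PySem.List.mem_pyRange_one] at hi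
  unfold Aj
  refine foldl_id_mem _ _ (fun s2 j hj => ?_) s1
  rw [PySem.List.mem_pyRange_one] at hj
  unfold Ak
  refine foldl_id_mem _ _ (fun s3 k hk => ?_) s2
  rw [PySem.List.mem_pyRange_one] at hk
  unfold Al
  refine foldl_id_mem _ _ (fun s4 l hl => ?_) s3
  rw [PySem.List.mem_pyRange_one] at hl
  unfold Am
  refine foldl_id_mem _ _ (fun s5 m hm => ?_) s4
  rw [PySem.List.mem_pyRange_one] at hm
  split_ifs with h1 h2 <;> try rfl
  all_goals (exfalso; simp only [Bool.and_eq_true, bne_iff_ne, ne_eq] at h1; omega)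

-- ===== VERDICT (by name: the statement is the Claim_ definition above) =====
theorem internal_spec : Claim_equal_internal := by
  intro graph _ _
  unfold Spec_internal
  rw [internal_eq_Ai]
  simp only [internal_alt]
  split_ifs with h
  · exact Ai_small graph _ (by omega) _
  · exact Li graph _ _
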